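-- pv_equiv track=rewrite | github.com/AntonEryomin/yandex_algo_training | Тренировки по алгоритмам 1.0/Домашнее задание 3/Task F.py | solution
-- ===== SOURCE A (Python) =====
-- def solution(genom_a: str, genom_b: str) -> int:
--     # все пары генома А
--     gen_a_pairs = {}
--     for idx in range(1, len(genom_a)):
--         gen_pair = genom_a[idx-1:idx+1]
--         if gen_pair in gen_a_pairs:
--             gen_a_pairs[gen_pair] += 1
--         else:
--             gen_a_pairs[gen_pair] = 1
--
--     # все пары генома B
--     gen_b_pairs = {}
--     for idx in range(1, len(genom_b)):
--         gen_pair = genom_b[idx - 1:idx + 1]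
--         if gen_pair in gen_b_pairs:
--             gen_b_pairs[gen_pair] += 1
--         else:
--             gen_b_pairs[gen_pair] = 1
--
--     # Смотрим уникальные пары генов для генома А, если такая же пара есть в геноме Б, тогда мы добавляем к паре сходства
--     common_gens = 0
--     for k, v in gen_a_pairs.items():
--         if k in gen_b_pairs:
--             common_gens += v
--     return common_gens
-- ===== SOURCE B (Python) =====
-- def solution(genom_a: str, genom_b: str) -> int:
--     # sort-and-merge: sorted list of A's bigrams, sorted deduped list of B's bigrams,
--     # then a two-pointer merge counts A-bigrams whose value occurs in B.
--     a_pairs = sorted(genom_a[i - 1:i + 1] for i in range(1, len(genom_a)))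
--     b_pairs = sorted({genom_b[i - 1:i + 1] for i in range(1, len(genom_b))})
--     i = j = total = 0
--     while i < len(a_pairs) and j < len(b_pairs):
--         if a_pairs[i] < b_pairs[j]:
--             i += 1
--         elif a_pairs[i] > b_pairs[j]:
--             j += 1
--         else:
--             total += 1
--             i += 1
--     return total
-- ===== Notes on version B (the rewrite author's own statement) =====
-- stated objective: alternative
-- what changed: B replaces A's two frequency dictionaries and the items-iteration pass by a sort-and-merge algorithm: it sorts genom_a's bigram list and genom_b's deduplicated bigram list and counts matches with a two-pointer merge.
import Mathlib
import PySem

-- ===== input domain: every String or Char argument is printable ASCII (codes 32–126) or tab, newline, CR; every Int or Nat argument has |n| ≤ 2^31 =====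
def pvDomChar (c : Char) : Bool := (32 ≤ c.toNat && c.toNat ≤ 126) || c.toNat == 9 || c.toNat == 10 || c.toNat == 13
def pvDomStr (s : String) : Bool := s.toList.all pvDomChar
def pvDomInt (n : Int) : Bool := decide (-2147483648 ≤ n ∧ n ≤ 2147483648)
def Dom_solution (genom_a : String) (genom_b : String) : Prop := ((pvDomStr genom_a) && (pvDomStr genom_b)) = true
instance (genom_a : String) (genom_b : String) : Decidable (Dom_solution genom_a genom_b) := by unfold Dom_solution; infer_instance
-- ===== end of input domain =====

-- B replaces A's two frequency tables and the table-iteration pass by a sort-and-merge algorithm: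
-- sorted bigram list of genom_a, sorted deduplicated bigram list of genom_b, then a two-pointer
-- merge counts the matches (objective: alternative algorithm, not claimed faster).

-- ===== PORT A =====
def solution (genom_a : String) (genom_b : String) : Int :=
  let a := genom_a.toList
  let b := genom_b.toList
  -- gen_a_pairs: for idx in range(1, len(genom_a)): if pair in dict: += 1 else: = 1
  let genAPairs : PySem.Dict (List Char) Int :=
    (PySem.List.pyRange 1 (PySem.List.len a)).foldl
      (fun d idx =>
        let genPair := PySem.List.slice a (some (idx - 1)) (some (idx + 1))
        if d.contains genPair then d.insert genPair (d.getD genPair 0 + 1)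
        else d.insert genPair 1)
      PySem.Dict.empty
  let genBPairs : PySem.Dict (List Char) Int :=
    (PySem.List.pyRange 1 (PySem.List.len b)).foldl
      (fun d idx =>
        let genPair := PySem.List.slice b (some (idx - 1)) (some (idx + 1))
        if d.contains genPair then d.insert genPair (d.getD genPair 0 + 1)
        else d.insert genPair 1)
      PySem.Dict.empty
  -- for k, v in gen_a_pairs.items(): if k in gen_b_pairs: common_gens += v
  genAPairs.items.foldl
    (fun commonGens kv => if genBPairs.contains kv.1 then commonGens + kv.2 else commonGens)
    0

-- ===== PORT B =====
-- the while loop of Source B: two index pointers over the two sorted lists, running total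
def mergeCount (xs ys : List (List Char)) (i j : Nat) (total : Int) : Int :=
  if h : i < xs.length ∧ j < ys.length then
    if xs[i] < ys[j] then mergeCount xs ys (i + 1) j total
    else if ys[j] < xs[i] then mergeCount xs ys i (j + 1) total
    else mergeCount xs ys (i + 1) j (total + 1)
  else total
termination_by (xs.length - i) + (ys.length - j)
decreasing_by all_goals omega

def solution_alt (genom_a : String) (genom_b : String) : Int :=
  let a := genom_a.toList
  let b := genom_b.toList
  -- a_pairs = sorted(genom_a[i-1:i+1] for i in range(1, len(genom_a)))
  let aPairs : List (List Char) :=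
    @PySem.List.sorted (List Char) (List Char) List.instLinearOrder.toLT LinearOrder.toDecidableLT
      ((PySem.List.pyRange 1 (PySem.List.len a)).map
        (fun i => PySem.List.slice a (some (i - 1)) (some (i + 1)))) (fun x => x) false
  -- b_pairs = sorted({genom_b[i-1:i+1] for i in range(1, len(genom_b))})
  let bPairs : List (List Char) :=
    @PySem.List.sorted (List Char) (List Char) List.instLinearOrder.toLT LinearOrder.toDecidableLT
      (PySem.Set.ofList ((PySem.List.pyRange 1 (PySem.List.len b)).map
        (fun i => PySem.List.slice b (some (i - 1)) (some (i + 1))))) (fun x => x) false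
  mergeCount aPairs bPairs 0 0 0

-- ===== PRECONDITION & SPEC =====
def Spec_solution (genom_a : String) (genom_b : String) (out : Int) : Prop := out = solution_alt genom_a genom_b
instance (genom_a : String) (genom_b : String) (out : Int) : Decidable (Spec_solution genom_a genom_b out) := by unfold Spec_solution; infer_instance

-- ===== CLAIM (what is proved, stated in full; the proofs are below) =====
def Claim_equal_solution : Prop := ∀ (genom_a : String) (genom_b : String), Dom_solution genom_a genom_b → Spec_solution genom_a genom_b (solution genom_a genom_b)

-- ===== LEMMAS AND PROOFS =====

-- the list of adjacent pairs of s, as both A and B enumerate them (idx = 1 .. len-1)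
def pvPairs (s : List Char) : List (List Char) :=
  (PySem.List.pyRange 1 (PySem.List.len s)).map
    (fun idx => PySem.List.slice s (some (idx - 1)) (some (idx + 1)))

-- A's dict-building loop is Counter(pvPairs s)
theorem pv_counter (s : List Char) :
    (PySem.List.pyRange 1 (PySem.List.len s)).foldl
      (fun d idx =>
        let genPair := PySem.List.slice s (some (idx - 1)) (some (idx + 1))
        if d.contains genPair then d.insert genPair (d.getD genPair 0 + 1)
        else d.insert genPair 1)
      PySem.Dict.empty = PySem.Dict.counter (pvPairs s) := by
  rw [pvPairs, ← PySem.Dict.foldl_insert_getD_add_one_eq_counter, List.foldl_map]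
  apply PySem.List.foldl_congr_mem
  intro d idx _
  simp only []
  by_cases h : d.contains (PySem.List.slice s (some (idx - 1)) (some (idx + 1))) = true
  · simp [h]
  · simp only [Bool.not_eq_true] at h
    simp [h, PySem.Dict.getD_of_not_contains _ 0 h]

-- summing multiplicities over the distinct matching keys is direct counting
theorem pv_sum_count_eq_countP (l : List (List Char)) (p : List Char → Bool) :
    (((PySem.Set.ofList l).filter p).map (fun k => (l.count k : Int))).sum
      = (l.countP p : Int) := by
  have hperm : (PySem.Set.ofList l).Perm l.dedup := by
    refine (List.perm_ext_iff_of_nodup (PySem.Set.nodup_ofList l) l.nodup_dedup).2 ?_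
    intro x; rw [PySem.Set.mem_ofList, List.mem_dedup]
  have h1 : (((PySem.Set.ofList l).filter p).map (fun k => (l.count k : Int))).sum
      = ((l.dedup.filter p).map (fun k => (l.count k : Int))).sum :=
    List.Perm.sum_eq (List.Perm.map _ (List.Perm.filter _ hperm))
  have hcnt : ∀ (x : List Char) (ys : List (List Char)),
      @List.count _ instBEqOfDecidableEq x ys = List.count x ys := by
    intro x ys
    induction ys with
    | nil => rfl
    | cons y t ih => simp [List.count_cons, ih, beq_iff_eq]
  have h2 : ((l.dedup.filter p).map (fun k => List.count k l)).sum = l.countP p := by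
    have h0 := List.sum_map_count_dedup_filter_eq_countP p l
    simpa [hcnt] using h0
  calc (((PySem.Set.ofList l).filter p).map (fun k => (l.count k : Int))).sum
      = ((l.dedup.filter p).map (fun k => (l.count k : Int))).sum := h1
    _ = (((l.dedup.filter p).map (fun k => l.count k)).sum : Int) := by
        induction (l.dedup.filter p) with
        | nil => simp
        | cons x t ih => simp [ih]
    _ = (l.countP p : Int) := congrArg _ h2

-- A's items pass over Counter(LA), filtered by membership in Counter(LB)
theorem pv_A_pass (la lb : List (List Char)) :
    ((PySem.Dict.counter la).items).foldl
      (fun commonGens kv =>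
        if (PySem.Dict.counter lb).contains kv.1 then commonGens + kv.2 else commonGens) 0
      = (la.countP (fun k => lb.contains k) : Int) := by
  rw [PySem.Dict.items_counter, List.foldl_map]
  simp only []
  rw [PySem.List.foldl_congr_mem _ _
        (fun (acc : Int) k => if lb.contains k = true then acc + (la.count k : Int) else acc) _
        (by intro acc k _; rw [PySem.Dict.contains_counter]),
      PySem.List.foldl_if_eq_foldl_filter (fun k => lb.contains k)
        (fun (acc : Int) k => acc + (la.count k : Int)),
      PySem.List.foldl_add (g := fun k => (la.count k : Int))]
  rw [zero_add]
  exact pv_sum_count_eq_countP la (fun k => lb.contains k)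

-- in a Pairwise-R list, l[j] is R-below every element of the tail after it
theorem pv_drop_rel {R : List Char → List Char → Prop} {l : List (List Char)}
    (hp : l.Pairwise R) {j : Nat} (hj : j < l.length) :
    ∀ y ∈ l.drop (j + 1), R l[j] y := by
  have h := hp.sublist (List.drop_sublist j l)
  rw [List.drop_eq_getElem_cons hj] at h
  exact (List.pairwise_cons.1 h).1

-- the two-pointer merge counts, for each remaining element of xs, whether it occurs in the rest of ys
theorem pv_mergeCount_eq (xs ys : List (List Char))
    (hx : xs.Pairwise (· ≤ ·)) (hy : ys.Pairwise (· < ·)) (i j : Nat) (t : Int) :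
    mergeCount xs ys i j t
      = t + ((xs.drop i).countP (fun x => decide (x ∈ ys.drop j)) : Int) := by
  fun_induction mergeCount xs ys i j t with
  | case1 i j total h hlt ih =>
      rw [ih, List.drop_eq_getElem_cons h.1, List.countP_cons_of_neg]
      simp only [decide_eq_true_eq]
      intro hmem
      rw [List.drop_eq_getElem_cons h.2] at hmem
      rcases List.mem_cons.1 hmem with hmem | hmem
      · exact absurd hlt (by rw [hmem]; exact lt_irrefl _)
      · exact absurd (lt_trans hlt (pv_drop_rel hy h.2 _ hmem)) (lt_irrefl _)
  | case2 i j total h hlt1 hlt2 ih =>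
      rw [ih]
      congr 2
      apply List.countP_congr
      intro x hxmem
      have hxge : xs[i] ≤ x := by
        rw [List.drop_eq_getElem_cons h.1] at hxmem
        rcases List.mem_cons.1 hxmem with hxe | hxe
        · exact le_of_eq hxe.symm
        · exact pv_drop_rel hx h.1 _ hxe
      have hne : x ≠ ys[j] := fun he => absurd (lt_of_lt_of_le hlt2 hxge) (by rw [he]; exact lt_irrefl _)
      simp only [decide_eq_true_eq]
      rw [List.drop_eq_getElem_cons h.2, List.mem_cons]
      exact ⟨fun hm => Or.inr hm, fun hm => hm.resolve_left hne⟩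
  | case3 i j total h hlt1 hlt2 ih =>
      have heq : xs[i] = ys[j] := le_antisymm (not_lt.1 hlt2) (not_lt.1 hlt1)
      rw [ih, List.drop_eq_getElem_cons h.1, List.countP_cons_of_pos]
      · push_cast; ring
      · simp only [decide_eq_true_eq]
        rw [List.drop_eq_getElem_cons h.2, heq]
        exact List.mem_cons_self
  | case4 i j total h =>
      rcases not_and_or.1 h with h1 | h1
      · rw [List.drop_eq_nil_of_le (le_of_not_gt h1)]
        simp
      · rw [List.drop_eq_nil_of_le (le_of_not_gt h1)]
        simp

-- ===== VERDICT (by name: the statement is the Claim_ definition above) =====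
theorem solution_spec : Claim_equal_solution := by
  intro genom_a genom_b _
  unfold Spec_solution solution solution_alt
  simp only []
  rw [pv_counter genom_a.toList, pv_counter genom_b.toList,
      pv_A_pass (pvPairs genom_a.toList) (pvPairs genom_b.toList)]
  rw [show (PySem.List.pyRange 1 (PySem.List.len genom_a.toList)).map
        (fun i => PySem.List.slice genom_a.toList (some (i - 1)) (some (i + 1)))
      = pvPairs genom_a.toList from rfl]
  rw [show (PySem.List.pyRange 1 (PySem.List.len genom_b.toList)).map
        (fun i => PySem.List.slice genom_b.toList (some (i - 1)) (some (i + 1)))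
      = pvPairs genom_b.toList from rfl]
  have hxs : (@PySem.List.sorted (List Char) (List Char) List.instLinearOrder.toLT LinearOrder.toDecidableLT
      (pvPairs genom_a.toList) (fun x => x) false).Pairwise (· ≤ ·) :=
    PySem.List.sorted_pairwise (pvPairs genom_a.toList) (fun x => x)
  have hys : (@PySem.List.sorted (List Char) (List Char) List.instLinearOrder.toLT LinearOrder.toDecidableLT
      (PySem.Set.ofList (pvPairs genom_b.toList)) (fun x => x) false).Pairwise (· < ·) :=
    PySem.List.sorted_ofList_pairwise_lt (pvPairs genom_b.toList)
  rw [pv_mergeCount_eq _ _ hxs hys 0 0 0]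
  rw [List.drop_zero, List.drop_zero, zero_add]
  rw [(@PySem.List.sorted_perm (List Char) (List Char) List.instLinearOrder.toLT LinearOrder.toDecidableLT
        (pvPairs genom_a.toList) (fun x => x) false).countP_eq]
  congr 1
  apply List.countP_congr
  intro k _
  simp [PySem.List.mem_sorted, PySem.Set.mem_ofList]
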